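-- pv_equiv track=rewrite | github.com/Kesendo/R-equals-C-Psi-squared | simulations/_visualize_super_operator.py | pauli_string_xy_weight
-- ===== SOURCE A (Python) =====
-- def pauli_string_xy_weight(k, N):
--     weight = 0
--     kk = k
--     for _ in range(N):
--         if kk % 4 & 1:
--             weight += 1
--         kk //= 4
--     return weight
-- ===== SOURCE B (Python) =====
-- def pauli_string_xy_weight(k, N):
--     if N <= 0:
--         return 0
--     mask = (4 ** N - 1) // 3          # 0b0101...01 with N ones on the even bit positions
--     return ((k % 4 ** N) & mask).bit_count()
-- ===== Notes on version B (the rewrite author's own statement) =====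
-- stated objective: faster
-- what changed: Replaces A's N-iteration base-4 digit loop by a single mask-and-popcount: mask = (4**N-1)//3 selects the even bit positions and the answer is ((k % 4**N) & mask).bit_count().
import Mathlib
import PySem

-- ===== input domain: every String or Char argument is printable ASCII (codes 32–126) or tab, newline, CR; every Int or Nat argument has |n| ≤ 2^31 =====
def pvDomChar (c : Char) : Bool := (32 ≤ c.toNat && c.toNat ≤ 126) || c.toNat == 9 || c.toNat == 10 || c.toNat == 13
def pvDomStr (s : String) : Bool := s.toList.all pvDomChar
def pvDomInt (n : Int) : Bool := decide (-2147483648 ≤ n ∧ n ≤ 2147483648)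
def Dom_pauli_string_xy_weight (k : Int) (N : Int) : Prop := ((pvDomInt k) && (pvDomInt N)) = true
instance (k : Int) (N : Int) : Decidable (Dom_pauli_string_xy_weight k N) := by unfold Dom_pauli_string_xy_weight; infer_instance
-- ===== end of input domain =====

-- B replaces A's per-digit loop by one mask-and-popcount: mask = (4**N-1)//3 selects the
-- even bit positions, so the answer is ((k % 4**N) & mask).bit_count() (objective: idiomatic).

-- ===== PORT A =====
def pauli_string_xy_weight (k : Int) (N : Int) : Int :=
  -- weight = 0; kk = k; for _ in range(N): if kk % 4 & 1: weight += 1; kk //= 4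
  let s := (List.range N.toNat).foldl
    (fun (st : Int × Int) (_ : Nat) =>
      let weight := if PySem.Int.band (PySem.Int.mod st.2 4) 1 ≠ 0 then st.1 + 1 else st.1
      (weight, PySem.Int.floordiv st.2 4))
    (0, k)
  s.1

-- ===== PORT B =====
def pauli_string_xy_weight_alt (k : Int) (N : Int) : Int :=
  if N ≤ 0 then 0
  else
    let mask : Int := PySem.Int.floordiv (4 ^ N.toNat - 1) 3
    ((PySem.Int.bitCount (PySem.Int.band (PySem.Int.mod k (4 ^ N.toNat)) mask) : Nat) : Int)

-- ===== PRECONDITION & SPEC =====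
def Spec_pauli_string_xy_weight (k : Int) (N : Int) (out : Int) : Prop := out = pauli_string_xy_weight_alt k N
instance (k : Int) (N : Int) (out : Int) : Decidable (Spec_pauli_string_xy_weight k N out) := by unfold Spec_pauli_string_xy_weight; infer_instance

-- ===== CLAIM (what is proved, stated in full; the proofs are below) =====
def Claim_equal_pauli_string_xy_weight : Prop := ∀ (k : Int) (N : Int), Dom_pauli_string_xy_weight k N → Spec_pauli_string_xy_weight k N (pauli_string_xy_weight k N)

-- ===== LEMMAS AND PROOFS =====

-- the count A's loop computes in n iterations starting from kk = k
def pvCountNat : Nat → Int → Int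
  | 0, _ => 0
  | n+1, k =>
      (if PySem.Int.band (PySem.Int.mod k 4) 1 ≠ 0 then 1 else 0)
        + pvCountNat n (PySem.Int.floordiv k 4)

-- the mask (4^n - 1)/3 over Nat
def pvMask (n : Nat) : Nat := (4 ^ n - 1) / 3

lemma pvMask_three (n : Nat) : 3 * pvMask n + 1 = 4 ^ n := by
  induction n with
  | zero => simp [pvMask]
  | succ n ih =>
      have h1 : 4 ^ (n+1) - 1 = 3 * (4 * pvMask n + 1) := by
        have : 4 ^ (n+1) = 4 * 4 ^ n := by ring
        omega
      have h2 : pvMask (n+1) = 4 * pvMask n + 1 := by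
        unfold pvMask; rw [h1]; omega
      have : 4 ^ (n+1) = 4 * 4 ^ n := by ring
      omega

lemma pvMask_succ (n : Nat) : pvMask (n+1) = 4 * pvMask n + 1 := by
  have h1 := pvMask_three n
  have h2 := pvMask_three (n+1)
  have : (4:Nat) ^ (n+1) = 4 * 4 ^ n := by ring
  omega

-- low-bit decomposition of &&& against a mask of shape 4*m+1
lemma pv_land_decomp (a m : Nat) :
    a &&& (4 * m + 1) = a % 2 + 4 * (a / 4 &&& m) := by
  apply Nat.eq_of_testBit_eq
  intro i
  obtain _ | _ | i := i
  · have h1 : (4 * m + 1) % 2 = 1 := by omega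
    have h2 : (a % 2 + 4 * (a / 4 &&& m)) % 2 = a % 2 := by omega
    rw [Nat.testBit_land]
    simp [Nat.testBit_zero, h1, h2]
  · have h1 : ((4 * m + 1) / 2) % 2 = 0 := by omega
    have h2 : ((a % 2 + 4 * (a / 4 &&& m)) / 2) % 2 = 0 := by omega
    rw [Nat.testBit_land]
    simp [Nat.testBit_succ, Nat.testBit_zero, h1, h2]
  · have h1 : (4 * m + 1) / 2 / 2 = m := by omega
    have h2 : (a % 2 + 4 * (a / 4 &&& m)) / 2 / 2 = a / 4 &&& m := by omega
    have h3 : a / 2 / 2 = a / 4 := by omega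
    rw [Nat.testBit_land]
    simp [Nat.testBit_succ, h1, h2, h3]

-- bitCount of b + 4*x with b ≤ 1 is b + bitCount x
lemma pv_bc_even (x : Nat) :
    PySem.Int.bitCount ((2 * x : Nat) : Int) = PySem.Int.bitCount ((x : Nat) : Int) := by
  rcases Nat.eq_zero_or_pos x with hx | hx
  · simp [hx]
  · rw [PySem.Int.bitCount_natCast (m := 2 * x) (by omega)]
    have : (2 * x) % 2 = 0 := by omega
    have h2 : (2 * x) / 2 = x := by omega
    simp [this, h2]

lemma pv_bc_step (b x : Nat) (hb : b ≤ 1) :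
    PySem.Int.bitCount ((b + 4 * x : Nat) : Int) = b + PySem.Int.bitCount ((x : Nat) : Int) := by
  rcases Nat.eq_zero_or_pos (b + 4 * x) with h0 | h0
  · have hb0 : b = 0 := by omega
    have hx0 : x = 0 := by omega
    simp [hb0, hx0]
  · rw [PySem.Int.bitCount_natCast (m := b + 4 * x) h0]
    have h1 : (b + 4 * x) % 2 = b := by omega
    have h2 : (b + 4 * x) / 2 = 2 * x := by omega
    rw [h1, h2, pv_bc_even]

-- splitting k mod 4^(n+1) into its low base-4 digit and the rest
lemma pv_emod_split (k : Int) (n : Nat) :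
    k % (4:Int) ^ (n+1) = 4 * (k / 4 % (4:Int) ^ n) + k % 4 := by
  have hM : (0:Int) < (4:Int) ^ n := by positivity
  have hq : k = 4 * (k / 4) + k % 4 := by omega
  have hq2 : (4:Int) ^ n * (k / 4 / (4:Int) ^ n) + k / 4 % (4:Int) ^ n = k / 4 :=
    Int.mul_ediv_add_emod _ _
  have hrep : k = (4 * (k / 4 % (4:Int) ^ n) + k % 4) + (4:Int) ^ (n+1) * (k / 4 / (4:Int) ^ n) := by
    have h4 : (4:Int) ^ (n+1) = 4 * (4:Int) ^ n := by ring
    rw [h4]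
    linear_combination hq + 4 * hq2.symm
  have hb1 : 0 ≤ k / 4 % (4:Int) ^ n := Int.emod_nonneg _ (by positivity)
  have hb2 : k / 4 % (4:Int) ^ n < (4:Int) ^ n := Int.emod_lt_of_pos _ hM
  have hb3 : 0 ≤ k % 4 := by omega
  have hb4 : k % 4 < 4 := by omega
  calc k % (4:Int) ^ (n+1)
      = ((4 * (k / 4 % (4:Int) ^ n) + k % 4) + (4:Int) ^ (n+1) * (k / 4 / (4:Int) ^ n)) % (4:Int) ^ (n+1) := by
        rw [← hrep]
    _ = (4 * (k / 4 % (4:Int) ^ n) + k % 4) % (4:Int) ^ (n+1) := by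
        rw [Int.add_mul_emod_self_left]
    _ = 4 * (k / 4 % (4:Int) ^ n) + k % 4 := by
        apply Int.emod_eq_of_lt
        · omega
        · have : (4:Int) ^ (n+1) = 4 * (4:Int) ^ n := by ring
          omega

-- main bridge: B's mask-and-popcount equals A's per-digit count
lemma pv_key (n : Nat) : ∀ k : Int,
    (PySem.Int.bitCount ((((k % (4:Int) ^ n).toNat &&& pvMask n : Nat)) : Int) : Int)
      = pvCountNat n k := by
  induction n with
  | zero =>
      intro k
      simp [pvMask, pvCountNat]
  | succ n ih =>
      intro k
      have hM : (0:Int) < (4:Int) ^ n := by positivity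
      have hsplit := pv_emod_split k n
      have hQb1 : 0 ≤ k / 4 % (4:Int) ^ n := Int.emod_nonneg _ (by positivity)
      have hQb2 : k / 4 % (4:Int) ^ n < (4:Int) ^ n := Int.emod_lt_of_pos _ hM
      have htoNat : (k % (4:Int) ^ (n+1)).toNat
          = 4 * (k / 4 % (4:Int) ^ n).toNat + (k % 4).toNat := by
        rw [hsplit]; omega
      rw [htoNat, pvMask_succ, pv_land_decomp]
      have h1 : (4 * (k / 4 % (4:Int) ^ n).toNat + (k % 4).toNat) % 2 = (k % 4).toNat % 2 := by
        omega
      have h2 : (4 * (k / 4 % (4:Int) ^ n).toNat + (k % 4).toNat) / 4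
          = (k / 4 % (4:Int) ^ n).toNat := by
        omega
      rw [h1, h2, pv_bc_step _ _ (by omega)]
      show ((((k % 4).toNat % 2 : Nat) : Int)
            + (PySem.Int.bitCount ((((k / 4 % (4:Int) ^ n).toNat &&& pvMask n : Nat)) : Int) : Int))
          = pvCountNat (n+1) k
      rw [ih (k / 4)]
      show _ = (if PySem.Int.band (PySem.Int.mod k 4) 1 ≠ 0 then 1 else 0)
            + pvCountNat n (PySem.Int.floordiv k 4)
      rw [PySem.Int.band_one, PySem.Int.mod_eq_emod_of_pos (by norm_num : (0:Int) < 4),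
          PySem.Int.mod_eq_emod_of_pos (by norm_num : (0:Int) < 2),
          PySem.Int.floordiv_eq_ediv_of_pos (by norm_num : (0:Int) < 4)]
      have hbit : (((k % 4).toNat % 2 : Nat) : Int) = if k % 4 % 2 ≠ 0 then 1 else 0 := by
        split_ifs <;> omega
      rw [hbit]

-- A's foldl accumulates pvCountNat
lemma pv_loop (n : Nat) : ∀ (w k : Int),
    ((List.range n).foldl
      (fun (st : Int × Int) (_ : Nat) =>
        let weight := if PySem.Int.band (PySem.Int.mod st.2 4) 1 ≠ 0 then st.1 + 1 else st.1
        (weight, PySem.Int.floordiv st.2 4)) (w, k)).1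
      = w + pvCountNat n k := by
  induction n with
  | zero => intro w k; simp [pvCountNat]
  | succ n ih =>
      intro w k
      rw [List.range_succ_eq_map]
      simp only [List.foldl_cons, List.foldl_map]
      show ((List.range n).foldl _
        ((if PySem.Int.band (PySem.Int.mod k 4) 1 ≠ 0 then w + 1 else w),
          PySem.Int.floordiv k 4)).1 = _
      rw [ih]
      show _ = w + ((if PySem.Int.band (PySem.Int.mod k 4) 1 ≠ 0 then 1 else 0)
            + pvCountNat n (PySem.Int.floordiv k 4))
      split_ifs <;> ring

-- ===== VERDICT (by name: the statement is the Claim_ definition above) =====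
theorem pauli_string_xy_weight_spec : Claim_equal_pauli_string_xy_weight := by
  intro k N _
  unfold Spec_pauli_string_xy_weight pauli_string_xy_weight pauli_string_xy_weight_alt
  by_cases hN : N ≤ 0
  · have h0 : N.toNat = 0 := by omega
    simp [hN, h0]
  · rw [if_neg hN]
    rw [pv_loop N.toNat 0 k]
    have hp : (0:Int) < 4 ^ N.toNat := by positivity
    have hone : 1 ≤ 4 ^ N.toNat := Nat.one_le_pow _ _ (by norm_num)
    have hmask : PySem.Int.floordiv ((4:Int) ^ N.toNat - 1) 3 = ((pvMask N.toNat : Nat) : Int) := by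
      have hcast : ((4:Int) ^ N.toNat - 1) = ((4 ^ N.toNat - 1 : Nat) : Int) := by
        rw [Nat.cast_sub hone]; push_cast; ring
      rw [hcast]
      exact_mod_cast PySem.Int.floordiv_natCast (4 ^ N.toNat - 1) 3
    rw [hmask, PySem.Int.mod_eq_emod_of_pos hp]
    show 0 + pvCountNat N.toNat k
        = ((PySem.Int.bitCount (PySem.Int.band (k % (4:Int) ^ N.toNat)
            ((pvMask N.toNat : Nat) : Int)) : Nat) : Int)
    rw [PySem.Int.band_of_nonneg (Int.emod_nonneg _ (by positivity)) (by positivity),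
        Int.toNat_natCast, pv_key N.toNat k]
    ring
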